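-- pv_equiv track=rewrite | github.com/cqs009/HackerPython | ScriptDemo/py04day.py | algorithmForPeace
-- ===== SOURCE A (Python) =====
-- def algorithmForPeace(starnum=2,lens=100):
--     '''
--         自定义求和函数
--     '''
--     num = starnum
--     count = 0
--     while(num <= lens):
--         if (num%2) == 0:
--             count = count + num
--         else:
--             count = count - num
--         num = num + 1
--
--     return count
-- ===== SOURCE B (Python) =====
-- def algorithmForPeace(starnum=2, lens=100):
--     # Closed form: H(x) = sum_{n<=x} (-1)^n * n telescopes; answer = H(lens) - H(starnum-1).
--     if starnum > lens:
--         return 0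
--     def H(x):
--         return x // 2 if x % 2 == 0 else -(x + 1) // 2
--     return H(lens) - H(starnum - 1)
-- ===== Notes on version B (the rewrite author's own statement) =====
-- stated objective: faster
-- what changed: Replaced the O(n) while-loop that adds evens and subtracts odds by the closed-form telescoping formula H(lens)-H(starnum-1) with H(x)=x//2 if x even else -(x+1)//2.
import Mathlib
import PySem

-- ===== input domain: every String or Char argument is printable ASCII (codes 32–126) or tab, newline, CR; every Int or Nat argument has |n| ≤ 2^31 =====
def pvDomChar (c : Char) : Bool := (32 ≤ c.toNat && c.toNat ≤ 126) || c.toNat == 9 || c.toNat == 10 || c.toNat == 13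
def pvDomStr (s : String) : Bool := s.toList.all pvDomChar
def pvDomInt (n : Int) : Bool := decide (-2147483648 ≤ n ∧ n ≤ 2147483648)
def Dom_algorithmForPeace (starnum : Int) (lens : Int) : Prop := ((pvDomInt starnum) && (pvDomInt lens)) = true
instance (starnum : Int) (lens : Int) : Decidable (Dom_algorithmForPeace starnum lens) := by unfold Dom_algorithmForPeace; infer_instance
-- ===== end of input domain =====

-- B replaces A's O(n) even-add/odd-subtract while-loop by the O(1) closed-form
-- telescoping formula H(lens) - H(starnum-1); proved equal on the whole domain.


-- ===== PORT A =====
-- the while-loop: state (num, count), runs while num ≤ lens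
def algoLoop (lens num count : Int) : Int :=
  if num ≤ lens then
    algoLoop lens (num + 1) (if PySem.Int.mod num 2 = 0 then count + num else count - num)
  else count
termination_by (lens + 1 - num).toNat
decreasing_by all_goals omega

def algorithmForPeace (starnum : Int) (lens : Int) : Int :=
  algoLoop lens starnum 0

-- ===== PORT B =====
-- H(x) = x//2 if x even else -(x+1)//2   (Python floor division via PySem)
def pvH (x : Int) : Int :=
  if PySem.Int.mod x 2 = 0 then PySem.Int.floordiv x 2
  else PySem.Int.floordiv (-(x + 1)) 2

def algorithmForPeace_alt (starnum : Int) (lens : Int) : Int :=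
  if starnum > lens then 0
  else pvH lens - pvH (starnum - 1)

-- ===== PRECONDITION & SPEC =====
def Spec_algorithmForPeace (starnum : Int) (lens : Int) (out : Int) : Prop := out = algorithmForPeace_alt starnum lens
instance (starnum : Int) (lens : Int) (out : Int) : Decidable (Spec_algorithmForPeace starnum lens out) := by unfold Spec_algorithmForPeace; infer_instance

-- ===== CLAIM (what is proved, stated in full; the proofs are below) =====
def Claim_equal_algorithmForPeace : Prop := ∀ (starnum : Int) (lens : Int), Dom_algorithmForPeace starnum lens → Spec_algorithmForPeace starnum lens (algorithmForPeace starnum lens)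

-- ===== LEMMAS AND PROOFS =====

-- telescoping step: H x - H (x-1) = (-1)^x * x
lemma pvH_step (x : Int) :
    pvH x - pvH (x - 1) = (if PySem.Int.mod x 2 = 0 then x else -x) := by
  have hm : ∀ a : Int, PySem.Int.mod a 2 = a % 2 :=
    fun a => PySem.Int.mod_eq_emod_of_pos (by norm_num)
  have hd : ∀ a : Int, PySem.Int.floordiv a 2 = a / 2 :=
    fun a => PySem.Int.floordiv_eq_ediv_of_pos (by norm_num)
  simp only [pvH, hm, hd]
  split_ifs <;> omega

lemma algoLoop_eq (lens num count : Int) :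
    algoLoop lens num count =
      count + (if num ≤ lens then pvH lens - pvH (num - 1) else 0) := by
  rw [algoLoop]
  have hs := pvH_step num
  split_ifs with h hm
  · rw [if_pos hm] at hs
    rw [algoLoop_eq lens (num + 1) (count + num)]
    by_cases h2 : num + 1 ≤ lens
    · rw [if_pos h2, show num + 1 - 1 = num from by omega]; omega
    · rw [if_neg h2]
      have hnl : lens = num := by omega
      subst hnl; omega
  · rw [if_neg hm] at hs
    rw [algoLoop_eq lens (num + 1) (count - num)]
    by_cases h2 : num + 1 ≤ lens
    · rw [if_pos h2, show num + 1 - 1 = num from by omega]; omega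
    · rw [if_neg h2]
      have hnl : lens = num := by omega
      subst hnl; omega
  · simp
termination_by (lens + 1 - num).toNat
decreasing_by all_goals omega

-- ===== VERDICT (by name: the statement is the Claim_ definition above) =====
theorem algorithmForPeace_spec : Claim_equal_algorithmForPeace := by
  intro s l _
  unfold Spec_algorithmForPeace algorithmForPeace algorithmForPeace_alt
  rw [algoLoop_eq]
  split_ifs <;> omega
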